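-- pv_equiv track=rewrite | github.com/GeorgianBadita/algorithmic-problems | Others/lc-mixed/python3-leetcode/easy/680.valid-palindrome-ii.py | can_be_palindrome_ignore
-- ===== SOURCE A (Python) =====
-- def can_be_palindrome_ignore(s, pos):
--     left, right = 0, len(s) - 1
--     while left < right:
--         if left == pos:
--             left += 1
--             continue
--         if right == pos:
--             right -= 1
--             continue
--         if s[left] != s[right]:
--             return False
--         left += 1
--         right -= 1
--     return True
-- ===== SOURCE B (Python) =====
-- def can_be_palindrome_ignore(s, pos):
--     t = s[:pos] + s[pos + 1:] if 0 <= pos < len(s) else s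
--     return t == t[::-1]
-- ===== Notes on version B (the rewrite author's own statement) =====
-- stated objective: simpler
-- what changed: Replaces the two-pointer scan that skips index pos with building the reduced string t (s with index pos removed when 0<=pos<len(s), else s) and a single slice-reverse comparison t == t[::-1].
import Mathlib
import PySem

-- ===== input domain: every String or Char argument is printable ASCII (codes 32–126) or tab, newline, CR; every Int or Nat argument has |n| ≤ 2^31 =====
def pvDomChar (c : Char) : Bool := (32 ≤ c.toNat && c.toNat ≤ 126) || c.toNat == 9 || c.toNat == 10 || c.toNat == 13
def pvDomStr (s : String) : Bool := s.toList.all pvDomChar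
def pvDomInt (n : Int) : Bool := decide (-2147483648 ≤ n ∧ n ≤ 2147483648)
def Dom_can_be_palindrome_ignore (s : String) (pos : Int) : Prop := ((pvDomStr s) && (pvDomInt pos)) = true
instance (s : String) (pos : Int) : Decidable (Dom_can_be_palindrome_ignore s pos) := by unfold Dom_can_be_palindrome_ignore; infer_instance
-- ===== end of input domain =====

-- B replaces A's two-pointer scan that skips index pos by deleting that index (when in range)
-- and comparing the reduced string with its reverse: simpler, same O(n) cost.

-- ===== PORT A =====
-- A's while-loop as recursion on right-left; s[i] read via PySem.List.pyGetD
-- (whenever the loop reads, 0 ≤ left < right ≤ len-1, so the index is always in range and Python never raises).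
def paLoop (cs : List Char) (pos left right : Int) : Bool :=
  if left < right then
    if left == pos then paLoop cs pos (left + 1) right
    else if right == pos then paLoop cs pos left (right - 1)
    else if PySem.List.pyGetD cs left ' ' != PySem.List.pyGetD cs right ' ' then false
    else paLoop cs pos (left + 1) (right - 1)
  else true
termination_by (right - left).toNat
decreasing_by all_goals (simp_wf; omega)

def can_be_palindrome_ignore (s : String) (pos : Int) : Bool :=
  paLoop s.toList pos 0 ((s.toList.length : Int) - 1)

-- ===== PORT B =====
def can_be_palindrome_ignore_alt (s : String) (pos : Int) : Bool :=
  let cs := s.toList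
  let t := if 0 ≤ pos ∧ pos < (cs.length : Int) then
      PySem.List.slice cs none (some pos) ++ PySem.List.slice cs (some (pos + 1)) none
    else cs
  t == t.reverse

-- ===== PRECONDITION & SPEC =====
def Spec_can_be_palindrome_ignore (s : String) (pos : Int) (out : Bool) : Prop := out = can_be_palindrome_ignore_alt s pos
instance (s : String) (pos : Int) (out : Bool) : Decidable (Spec_can_be_palindrome_ignore s pos out) := by unfold Spec_can_be_palindrome_ignore; infer_instance

-- ===== CLAIM (what is proved, stated in full; the proofs are below) =====
def Claim_equal_can_be_palindrome_ignore : Prop := ∀ (s : String) (pos : Int), Dom_can_be_palindrome_ignore s pos → Spec_can_be_palindrome_ignore s pos (can_be_palindrome_ignore s pos)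

-- ===== LEMMAS AND PROOFS =====

-- the untouched segment cs[l..r], and the same segment with index pos deleted when l ≤ pos ≤ r
def pvSeg (cs : List Char) (l r : Nat) : List Char := (cs.drop l).take (r + 1 - l)
def pvMid (cs : List Char) (pos : Int) (l r : Nat) : List Char :=
  if (l : Int) ≤ pos ∧ pos ≤ (r : Int) then (pvSeg cs l r).eraseIdx (pos.toNat - l) else pvSeg cs l r

lemma pvSeg_length (cs : List Char) (l r : Nat) (h : r < cs.length) :
    (pvSeg cs l r).length = r + 1 - l := by
  simp [pvSeg]; omega

lemma pv_short_pal (t : List Char) (h : t.length ≤ 1) : (t == t.reverse) = true := by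
  match t with
  | [] => rfl
  | [a] => simp
  | a :: b :: u => simp at h

lemma pv_wrap_pal (a b : Char) (u : List Char) :
    ((a :: (u ++ [b])) == (a :: (u ++ [b])).reverse) = (a == b && (u == u.reverse)) := by
  by_cases hab : a = b
  · subst hab
    simp
  · have h : (a == b) = false := by simp [hab]
    simp [h]

lemma pvSeg_decomp (cs : List Char) (l r : Nat) (hlr : l < r) (hr : r < cs.length) :
    ∃ (hl : l < cs.length),
      pvSeg cs l r = cs[l]'hl :: (pvSeg cs (l + 1) (r - 1) ++ [cs[r]'hr]) := by
  have hl : l < cs.length := by omega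
  refine ⟨hl, ?_⟩
  unfold pvSeg
  rw [List.drop_eq_getElem_cons hl]
  have h1 : r + 1 - l = (r - l) + 1 := by omega
  rw [h1, List.take_succ_cons]
  congr 1
  have h2 : r - l = (r - l - 1) + 1 := by omega
  rw [h2, List.take_add_one]
  have h3 : (cs.drop (l + 1))[r - l - 1]? = some (cs[r]'hr) := by
    rw [List.getElem?_drop]
    have h4 : l + 1 + (r - l - 1) = r := by omega
    rw [h4, List.getElem?_eq_getElem hr]
  rw [h3]
  have h5 : r - 1 + 1 - (l + 1) = r - l - 1 := by omega
  rw [h5]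
  rfl

-- main loop invariant: A's loop from (l, r) decides whether cs[l..r] minus position pos is a palindrome
lemma pvMain (cs : List Char) (pos : Int) :
    ∀ (k l r : Nat), r + 1 - l ≤ k → r < cs.length →
      paLoop cs pos (l : Int) (r : Int) = (pvMid cs pos l r == (pvMid cs pos l r).reverse) := by
  intro k
  induction k with
  | zero =>
    intro l r hk hr
    have hrl : ¬ ((l : Int) < (r : Int)) := by omega
    rw [paLoop]; rw [if_neg hrl]
    have hsl := pvSeg_length cs l r hr
    have hlen : (pvMid cs pos l r).length ≤ 1 := by
      unfold pvMid
      split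
      · have := ((pvSeg cs l r).eraseIdx_sublist (pos.toNat - l)).length_le
        omega
      · omega
    exact (pv_short_pal _ hlen).symm
  | succ k ih =>
    intro l r hk hr
    by_cases hlr : l < r
    · have hlrI : (l : Int) < (r : Int) := by omega
      rw [paLoop, if_pos hlrI]
      obtain ⟨hl, hdec⟩ := pvSeg_decomp cs l r hlr hr
      by_cases hpl : (l : Int) = pos
      · -- left == pos: skip left
        rw [if_pos (by simp [hpl] : ((l : Int) == pos) = true)]
        have hmid : pvMid cs pos l r = pvMid cs pos (l + 1) r := by
          unfold pvMid
          have hc1 : (l : Int) ≤ pos ∧ pos ≤ (r : Int) := by omega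
          rw [if_pos hc1, if_neg (by push_cast; omega)]
          have hpn : pos.toNat - l = 0 := by omega
          rw [hpn]
          unfold pvSeg
          rw [List.eraseIdx_eq_take_drop_succ]
          simp only [List.take_zero, List.nil_append]
          rw [List.drop_take, List.drop_drop]
          congr 1
        rw [hmid]
        have hc : ((l : Int) + 1) = ((l + 1 : Nat) : Int) := by push_cast; ring
        rw [hc]
        exact ih (l + 1) r (by omega) hr
      · by_cases hpr : (r : Int) = pos
        · -- right == pos: skip right
          rw [if_neg (by simp [hpl] : ¬ ((l : Int) == pos) = true),
            if_pos (by simp [hpr] : ((r : Int) == pos) = true)]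
          have hmid : pvMid cs pos l r = pvMid cs pos l (r - 1) := by
            unfold pvMid
            have hc1 : (l : Int) ≤ pos ∧ pos ≤ (r : Int) := by omega
            rw [if_pos hc1, if_neg (by omega)]
            have hpn : pos.toNat - l = r - l := by omega
            rw [hpn]
            unfold pvSeg
            rw [List.eraseIdx_eq_take_drop_succ]
            have hdone : ((cs.drop l).take (r + 1 - l)).drop (r - l + 1) = [] := by
              apply List.drop_eq_nil_of_le
              simp only [List.length_take, List.length_drop]
              omega
            rw [hdone, List.append_nil, List.take_take]
            congr 1
            omega
          rw [hmid]
          have hc : ((r : Int) - 1) = ((r - 1 : Nat) : Int) := by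
            push_cast [Nat.cast_sub (by omega : 1 ≤ r)]; ring
          rw [hc]
          exact ih l (r - 1) (by omega) (by omega)
        · -- compare ends
          rw [if_neg (by simp [hpl] : ¬ ((l : Int) == pos) = true),
            if_neg (by simp [hpr] : ¬ ((r : Int) == pos) = true)]
          have hga : PySem.List.pyGetD cs (l : Int) ' ' = cs[l]'hl := by
            rw [PySem.List.pyGetD_natCast, List.getD_eq_getElem cs ' ' hl]
          have hgb : PySem.List.pyGetD cs (r : Int) ' ' = cs[r]'hr := by
            rw [PySem.List.pyGetD_natCast, List.getD_eq_getElem cs ' ' hr]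
          have hmid : pvMid cs pos l r = cs[l]'hl :: (pvMid cs pos (l + 1) (r - 1) ++ [cs[r]'hr]) := by
            unfold pvMid
            by_cases hin : (l : Int) ≤ pos ∧ pos ≤ (r : Int)
            · have hin' : (((l + 1 : Nat) : Int) ≤ pos ∧ pos ≤ ((r - 1 : Nat) : Int)) := by
                push_cast [Nat.cast_sub (by omega : 1 ≤ r)]; omega
              rw [if_pos hin, if_pos hin', hdec]
              have hidx : pos.toNat - l = (pos.toNat - (l + 1)) + 1 := by omega
              rw [hidx, List.eraseIdx_cons_succ]
              congr 1
              rw [List.eraseIdx_append_of_lt_length]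
              rw [pvSeg_length cs (l + 1) (r - 1) (by omega)]
              omega
            · have hin' : ¬ (((l + 1 : Nat) : Int) ≤ pos ∧ pos ≤ ((r - 1 : Nat) : Int)) := by
                push_cast [Nat.cast_sub (by omega : 1 ≤ r)]
                push_cast at hin
                omega
              rw [if_neg hin, if_neg hin']
              exact hdec
          rw [hmid, pv_wrap_pal]
          by_cases hab : cs[l]'hl = cs[r]'hr
          · have hcmp : (PySem.List.pyGetD cs (l : Int) ' ' != PySem.List.pyGetD cs (r : Int) ' ') = false := by
              rw [hga, hgb]; simp [hab]
            rw [if_neg (by rw [hcmp]; simp : ¬ (PySem.List.pyGetD cs (l : Int) ' ' != PySem.List.pyGetD cs (r : Int) ' ') = true)]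
            have h1 : ((l : Int) + 1) = ((l + 1 : Nat) : Int) := by push_cast; ring
            have h2 : ((r : Int) - 1) = ((r - 1 : Nat) : Int) := by push_cast [Nat.cast_sub (by omega : 1 ≤ r)]; ring
            rw [h1, h2, ih (l + 1) (r - 1) (by omega) (by omega)]
            simp [hab]
          · have hcmp : (PySem.List.pyGetD cs (l : Int) ' ' != PySem.List.pyGetD cs (r : Int) ' ') = true := by
              rw [hga, hgb]; simp [hab]
            rw [hcmp]
            simp [hab]
    · have hrl : ¬ ((l : Int) < (r : Int)) := by omega
      rw [paLoop, if_neg hrl]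
      have hsl := pvSeg_length cs l r hr
      have hlen : (pvMid cs pos l r).length ≤ 1 := by
        unfold pvMid
        split
        · have := ((pvSeg cs l r).eraseIdx_sublist (pos.toNat - l)).length_le
          omega
        · omega
      exact (pv_short_pal _ hlen).symm

-- B's reduced list equals pvMid over the whole string
lemma pvAlt_eq (s : String) (pos : Int) (m : Nat) (hm : s.toList.length = m + 1) :
    can_be_palindrome_ignore_alt s pos = (pvMid s.toList pos 0 m == (pvMid s.toList pos 0 m).reverse) := by
  unfold can_be_palindrome_ignore_alt pvMid pvSeg
  dsimp only
  rw [hm]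
  simp only [List.drop_zero, Nat.sub_zero]
  have htake : s.toList.take (m + 1) = s.toList := List.take_of_length_le (by omega)
  rw [htake]
  by_cases hin : 0 ≤ pos ∧ pos < ((m + 1 : Nat) : Int)
  · rw [if_pos hin,
      if_pos (by push_cast at hin ⊢; omega : ((0 : Nat) : Int) ≤ pos ∧ pos ≤ ((m : Nat) : Int))]
    rw [PySem.List.slice_to _ hin.1, PySem.List.slice_from _ (by omega : (0 : Int) ≤ pos + 1)]
    rw [List.eraseIdx_eq_take_drop_succ]
    have hp1 : (pos + 1).toNat = pos.toNat + 1 := by omega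
    rw [hp1]
  · rw [if_neg hin,
      if_neg (by push_cast at hin ⊢; omega : ¬ (((0 : Nat) : Int) ≤ pos ∧ pos ≤ ((m : Nat) : Int)))]

-- ===== VERDICT (by name: the statement is the Claim_ definition above) =====
theorem can_be_palindrome_ignore_spec : Claim_equal_can_be_palindrome_ignore := by
  intro s pos _
  unfold Spec_can_be_palindrome_ignore
  unfold can_be_palindrome_ignore
  match hm : s.toList.length with
  | 0 =>
    have hnil : s.toList = [] := List.length_eq_zero_iff.mp hm
    have h01 : (((0 : Nat) : Int)) - 1 = (-1 : Int) := by norm_num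
    rw [h01, paLoop, if_neg (by norm_num)]
    simp only [can_be_palindrome_ignore_alt, hnil]
    split <;> simp [PySem.List.slice, PySem.List.clampIdx]
  | m + 1 =>
    have h1 : ((m + 1 : Nat) : Int) - 1 = ((m : Nat) : Int) := by push_cast; ring
    have h0 : (0 : Int) = ((0 : Nat) : Int) := by norm_num
    rw [h1, h0, pvMain s.toList pos (m + 1) 0 m (by omega) (by omega)]
    exact (pvAlt_eq s pos m hm).symm
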